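-- pv_equiv track=rewrite | github.com/osteofelidae/ForLoopConverter2 | ForLoopConverter.py | replaceMultiple
-- ===== SOURCE A (Python) =====
-- def deleteString(startIndex, stopIndex, strInput):
--     strOutput = strInput
--     strOutput = strOutput[:startIndex] + strOutput[stopIndex:]
--     return strOutput
--
-- def replaceMultiple(strReplacer, strToReplace, strInput, arrayReplaceIndexes):
--     lengthArrayReplace = len(arrayReplaceIndexes)
--     lengthStrToReplace = len(strToReplace)
--     lengthStrReplacer = len(strReplacer)
--     strOutput = strInput
--     for index in range(lengthArrayReplace):
--         replaceIndex = arrayReplaceIndexes[index]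
--         strOutput = deleteString(replaceIndex, replaceIndex + lengthStrToReplace, strOutput)
--         strOutput = strOutput[:replaceIndex] + strReplacer + strOutput[replaceIndex:]
--         for index2 in range(lengthArrayReplace):
--             arrayReplaceIndexes[index2] += lengthStrReplacer - lengthStrToReplace
--     return(strOutput)
-- ===== SOURCE B (Python) =====
-- def replaceMultiple(strReplacer, strToReplace, strInput, arrayReplaceIndexes):
--     lengthStrToReplace = len(strToReplace)
--     delta = len(strReplacer) - lengthStrToReplace
--     strOutput = strInput
--     for i, p in enumerate(arrayReplaceIndexes):
--         replaceIndex = p + i * delta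
--         deleted = strOutput[:replaceIndex] + strOutput[replaceIndex + lengthStrToReplace:]
--         strOutput = deleted[:replaceIndex] + strReplacer + deleted[replaceIndex:]
--     return strOutput
-- ===== Notes on version B (the rewrite author's own statement) =====
-- stated objective: simpler
-- what changed: B drops the inner loop that shifts every element of arrayReplaceIndexes after each replacement (and the deleteString helper), computing each position directly in closed form as arr[i] + i*(len(strReplacer)-len(strToReplace)) in a single enumerate pass without mutating the index list.
import Mathlib
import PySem

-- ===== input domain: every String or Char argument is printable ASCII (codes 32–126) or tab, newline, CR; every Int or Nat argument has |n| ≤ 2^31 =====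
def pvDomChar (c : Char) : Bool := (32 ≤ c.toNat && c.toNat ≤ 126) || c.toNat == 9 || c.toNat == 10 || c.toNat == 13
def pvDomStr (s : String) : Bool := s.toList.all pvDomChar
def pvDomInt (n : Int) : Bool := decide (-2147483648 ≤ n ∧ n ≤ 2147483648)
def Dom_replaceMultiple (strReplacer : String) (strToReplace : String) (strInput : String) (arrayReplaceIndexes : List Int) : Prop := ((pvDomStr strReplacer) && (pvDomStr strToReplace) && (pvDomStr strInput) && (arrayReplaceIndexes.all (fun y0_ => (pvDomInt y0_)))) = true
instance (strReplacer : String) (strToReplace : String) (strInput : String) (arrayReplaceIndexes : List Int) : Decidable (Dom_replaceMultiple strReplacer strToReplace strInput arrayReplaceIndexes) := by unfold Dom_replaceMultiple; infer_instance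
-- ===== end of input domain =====

-- B replaces A's inner loop that shifts every element of arrayReplaceIndexes after each step
-- by the closed-form position arr[i] + i*delta in a single enumerate pass (objective: simpler).
-- Note: A mutates arrayReplaceIndexes in place (adds m*delta to every element); B does not —
-- the equivalence proved here is about the RETURN value only.

-- ===== PORT A =====
def deleteStringA (startIndex : Int) (stopIndex : Int) (strInput : List Char) : List Char :=
  PySem.List.slice strInput none (some startIndex) ++ PySem.List.slice strInput (some stopIndex) none

def replaceMultiple (strReplacer : String) (strToReplace : String) (strInput : String) (arrayReplaceIndexes : List Int) : String :=
  let lengthArrayReplace : Int := (arrayReplaceIndexes.length : Int)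
  let lengthStrToReplace : Int := PySem.Str.len strToReplace
  let lengthStrReplacer : Int := PySem.Str.len strReplacer
  let final :=
    (PySem.List.pyRange 0 lengthArrayReplace 1).foldl
      (fun (st : List Char × List Int) (index : Int) =>
        let replaceIndex := PySem.List.pyGetD st.2 index 0
        let s1 := deleteStringA replaceIndex (replaceIndex + lengthStrToReplace) st.1
        let s2 := PySem.List.slice s1 none (some replaceIndex) ++ strReplacer.toList ++
                  PySem.List.slice s1 (some replaceIndex) none
        (s2, st.2.map (fun x => x + (lengthStrReplacer - lengthStrToReplace))))
      (strInput.toList, arrayReplaceIndexes)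
  String.ofList final.1

-- ===== PORT B =====
def replaceMultiple_alt (strReplacer : String) (strToReplace : String) (strInput : String) (arrayReplaceIndexes : List Int) : String :=
  let lengthStrToReplace : Int := PySem.Str.len strToReplace
  let delta : Int := PySem.Str.len strReplacer - lengthStrToReplace
  let final :=
    (PySem.List.enumerate arrayReplaceIndexes 0).foldl
      (fun (strOutput : List Char) (ip : Int × Int) =>
        let replaceIndex := ip.2 + ip.1 * delta
        let deleted := PySem.List.slice strOutput none (some replaceIndex) ++
                       PySem.List.slice strOutput (some (replaceIndex + lengthStrToReplace)) none
        PySem.List.slice deleted none (some replaceIndex) ++ strReplacer.toList ++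
        PySem.List.slice deleted (some replaceIndex) none)
      strInput.toList
  String.ofList final

-- ===== PRECONDITION & SPEC =====
def Spec_replaceMultiple (strReplacer : String) (strToReplace : String) (strInput : String) (arrayReplaceIndexes : List Int) (out : String) : Prop := out = replaceMultiple_alt strReplacer strToReplace strInput arrayReplaceIndexes
instance (strReplacer : String) (strToReplace : String) (strInput : String) (arrayReplaceIndexes : List Int) (out : String) : Decidable (Spec_replaceMultiple strReplacer strToReplace strInput arrayReplaceIndexes out) := by unfold Spec_replaceMultiple; infer_instance

-- ===== CLAIM (what is proved, stated in full; the proofs are below) =====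
def Claim_equal_replaceMultiple : Prop := ∀ (strReplacer : String) (strToReplace : String) (strInput : String) (arrayReplaceIndexes : List Int), Dom_replaceMultiple strReplacer strToReplace strInput arrayReplaceIndexes → Spec_replaceMultiple strReplacer strToReplace strInput arrayReplaceIndexes (replaceMultiple strReplacer strToReplace strInput arrayReplaceIndexes)

-- ===== LEMMAS AND PROOFS =====

-- The per-step string rewrite both programs perform at position r.
def pvSplice (rep : List Char) (L : Int) (s : List Char) (r : Int) : List Char :=
  let t := PySem.List.slice s none (some r) ++ PySem.List.slice s (some (r + L)) none
  PySem.List.slice t none (some r) ++ rep ++ PySem.List.slice t (some r) none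

-- A's loop with the mutated index array equals a pure fold reading arr[j] + (j - a)*δ.
lemma pvLoopA_closed (rep : List Char) (L δ : Int) :
    ∀ (n : Nat) (a : Int) (arr : List Int) (s : List Char),
      0 ≤ a → a + (n : Int) ≤ (arr.length : Int) →
      ((PySem.List.pyRange a (a + (n : Int)) 1).foldl
        (fun (st : List Char × List Int) (index : Int) =>
          (pvSplice rep L st.1 (PySem.List.pyGetD st.2 index 0),
           st.2.map (fun x => x + δ)))
        (s, arr)).1
      = (PySem.List.pyRange a (a + (n : Int)) 1).foldl
          (fun out j => pvSplice rep L out (PySem.List.pyGetD arr j 0 + (j - a) * δ)) s := by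
  intro n
  induction n with
  | zero =>
      intro a arr s _ _
      simp [PySem.List.pyRange_one_eq_nil (le_of_eq rfl)]
  | succ n ih =>
      intro a arr s ha hlen
      have hab : a < a + ((n+1 : Nat) : Int) := by push_cast; omega
      rw [PySem.List.pyRange_one_cons hab]
      simp only [List.foldl_cons]
      have harr : a + 1 + (n : Int) ≤ ((arr.map (fun x => x + δ)).length : Int) := by
        simp; push_cast at hlen ⊢; omega
      have h1 : a + ((n+1 : Nat) : Int) = a + 1 + (n : Int) := by push_cast; ring
      rw [h1]
      rw [ih (a + 1) (arr.map (fun x => x + δ))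
            (pvSplice rep L s (PySem.List.pyGetD arr a 0)) (by omega) harr]
      have hcong : ∀ (out : List Char) (j : Int), j ∈ PySem.List.pyRange (a+1) (a+1+(n:Int)) 1 →
          pvSplice rep L out (PySem.List.pyGetD (arr.map (fun x => x + δ)) j 0 + (j - (a+1)) * δ)
          = pvSplice rep L out (PySem.List.pyGetD arr j 0 + (j - a) * δ) := by
        intro out j hj
        rw [PySem.List.mem_pyRange_one] at hj
        have hj0 : 0 ≤ j := by omega
        have hjlt : j < (arr.length : Int) := by push_cast at hlen; omega
        have hjlt' : j < ((arr.map (fun x => x + δ)).length : Int) := by simpa using hjlt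
        have hjn : j.toNat < arr.length := by omega
        rw [PySem.List.pyGetD_eq_getElem (arr.map (fun x => x + δ)) 0 hj0 hjlt',
            PySem.List.pyGetD_eq_getElem arr 0 hj0 hjlt]
        have hmap : (arr.map (fun x => x + δ))[j.toNat]'(by simpa using hjn) = arr[j.toNat]'hjn + δ := by
          simp
        rw [hmap]
        congr 1
        ring
      simp only [sub_self, zero_mul, add_zero]
      exact PySem.List.foldl_congr_mem _ _ _ _ hcong

-- ===== VERDICT (by name: the statement is the Claim_ definition above) =====
theorem replaceMultiple_spec : Claim_equal_replaceMultiple := by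
  intro rep tor s arr _
  unfold Spec_replaceMultiple replaceMultiple replaceMultiple_alt
  simp only [PySem.List.enumerate_eq_map_pyRange arr (0 : Int), List.foldl_map]
  have key := pvLoopA_closed rep.toList (PySem.Str.len tor)
      (PySem.Str.len rep - PySem.Str.len tor) arr.length 0 arr s.toList (le_refl 0)
      (by simp)
  simp only [zero_add, sub_zero, pvSplice] at key
  simp only [PySem.List.len_eq]
  congr 1
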